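-- pv_equiv track=rewrite | github.com/mnemosyne-proj/mnemosyne | mnemosyne/libmnemosyne/controllers/default_controller.py | _retain_only_child_tags
-- ===== SOURCE A (Python) =====
-- def _retain_only_child_tags(tag_names):
--
--     """In case e.g. tag_names is ["a", "a::b"], return only ["a::b"]."""
--
--     parent_tag_names = []
--     for tag_name in tag_names:
--         partial_tag = ""
--         for node in tag_name.split("::")[:-1]:
--             if partial_tag:
--                 partial_tag += "::"
--             partial_tag += node
--             if partial_tag in tag_names:
--                 parent_tag_names.append(partial_tag)
--     return sorted(list(set(tag_names) - set(parent_tag_names)))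
-- ===== SOURCE B (Python) =====
-- def _retain_only_child_tags(tag_names):
--
--     """In case e.g. tag_names is ["a", "a::b"], return only ["a::b"]."""
--
--     # Downward check on node lists: split every distinct tag into its '::'
--     # node list once, then keep a tag iff no other tag's node list properly
--     # extends its own.  No ancestor-prefix strings are ever built.
--     distinct = list(dict.fromkeys(tag_names))
--     parts = [t.split("::") for t in distinct]
--     result = [t for t, nt in zip(distinct, parts)
--               if not any(len(nt) < len(ns) and ns[:len(nt)] == nt
--                          for ns in parts)]
--     return sorted(result)
-- ===== Notes on version B (the rewrite author's own statement) =====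
-- stated objective: alternative
-- what changed: A enumerates each tag's cumulative '::'-prefix strings upward and collects those found in the list into a parent accumulator; B splits every distinct tag into its node list once and keeps a tag iff no other tag's node list properly extends its own (a downward descendant-existence check), with no prefix strings and no parent list.
-- intended difference: On lists containing tags with empty '::'-nodes (e.g. tags starting with '::'), A's 'if partial_tag:' guard silently skips empty nodes, so A e.g. wrongly removes 'b' given '::b::c' and fails to remove '::b' given '::b::ba'; B removes exactly the true node-boundary ancestors, which is the documented intent. — e.g. on _retain_only_child_tags(["b", "::b::c"]): A returns ["::b::c"], B returns ["::b::c", "b"]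
import Mathlib
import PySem

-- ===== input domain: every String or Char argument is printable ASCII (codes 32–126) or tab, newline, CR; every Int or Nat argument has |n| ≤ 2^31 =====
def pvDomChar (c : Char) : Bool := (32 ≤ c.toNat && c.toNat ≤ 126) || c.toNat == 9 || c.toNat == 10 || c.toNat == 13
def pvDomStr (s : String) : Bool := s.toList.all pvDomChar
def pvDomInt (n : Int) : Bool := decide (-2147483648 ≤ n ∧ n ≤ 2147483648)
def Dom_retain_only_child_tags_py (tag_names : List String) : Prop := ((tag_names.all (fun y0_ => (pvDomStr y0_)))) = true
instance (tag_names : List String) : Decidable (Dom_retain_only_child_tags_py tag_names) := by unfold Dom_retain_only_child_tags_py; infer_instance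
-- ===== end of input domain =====

-- B replaces A's upward cumulative-prefix-string enumeration by a downward node-list
-- prefix check (objective: alternative); on tags with empty '::'-nodes A's empty-skipping
-- accumulator is wrong and B returns the intended node-boundary answer (see D_ below).

-- ===== PORT A =====
-- the '::'-split of a tag, t.split("::")  (shared by both ports and by D_ below)
def pvSplitTag (t : String) : List (List Char) := PySem.Chars.splitOn t.toList [':', ':']

def retain_only_child_tags_py (tag_names : List String) : List String :=
  let parent_tag_names : List String :=
    tag_names.foldl (fun parent_tag_names tag_name =>
      ((PySem.List.slice (pvSplitTag tag_name) none (some (-1))).foldl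
        (fun st node =>
          let partial_tag := if st.1 = ([] : List Char) then st.1 else st.1 ++ [':', ':']
          let partial_tag := partial_tag ++ node
          if String.ofList partial_tag ∈ tag_names then
            (partial_tag, st.2 ++ [String.ofList partial_tag])
          else (partial_tag, st.2))
        (([] : List Char), parent_tag_names)).2)
      []
  PySem.List.sorted
    (PySem.Set.diff (PySem.Set.ofList tag_names) (PySem.Set.ofList parent_tag_names))
    (fun x => x) false

-- ===== PORT B =====
def retain_only_child_tags_py_alt (tag_names : List String) : List String :=
  let distinct := PySem.List.dedup tag_names
  let parts := distinct.map (fun t => pvSplitTag t)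
  let result := ((distinct.zip parts).filter (fun p =>
      !(parts.any (fun ns => decide (p.2.length < ns.length) &&
          (PySem.List.slice ns none (some (p.2.length : Int)) == p.2))))).map Prod.fst
  PySem.List.sorted result (fun x => x) false

-- ===== PRECONDITION & SPEC =====
-- Helper for D_ (an input-shape condition; it never computes either program's output):
-- "s is a proper descendant of tag t at '::'-node granularity": t's node list is a prefix
-- of s's with at least one node to spare — judged against s's full node list (core = false)
-- or with s's leading empty nodes dropped, the way A's accumulator sees s (core = true)
def pvAnc (core : Bool) (t s : String) : Bool :=
  let ns := if core then (pvSplitTag s).dropWhile List.isEmpty else pvSplitTag s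
  (pvSplitTag t).isPrefixOf ns.dropLast

-- On lists containing tags with empty '::'-nodes (e.g. tags starting with "::"), A's
-- 'if partial_tag:' guard silently skips empty nodes, so A e.g. wrongly removes "b" given
-- "::b::c" and fails to remove "::b" given "::b::ba"; B removes exactly the true
-- node-boundary ancestors, which is the documented intent.
def D_retain_only_child_tags_py (tag_names : List String) : Prop :=
  ∃ t ∈ tag_names, t ≠ "" ∧
    tag_names.any (pvAnc true t) ≠ tag_names.any (pvAnc false t)
instance (tag_names : List String) : Decidable (D_retain_only_child_tags_py tag_names) := by
  unfold D_retain_only_child_tags_py; infer_instance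

def Spec_retain_only_child_tags_py (tag_names : List String) (out : List String) : Prop :=
  ¬ D_retain_only_child_tags_py tag_names → out = retain_only_child_tags_py_alt tag_names
instance (tag_names : List String) (out : List String) :
    Decidable (Spec_retain_only_child_tags_py tag_names out) := by
  unfold Spec_retain_only_child_tags_py; infer_instance

def pvDiffWitness_retain_only_child_tags_py : List String := ["b", "::b::c"]
def pvDiffWitnessOut_retain_only_child_tags_py : (List String) × (List String) :=
  (["::b::c"], ["::b::c", "b"])

-- ===== CLAIM (what is proved, stated in full; the proofs are below) =====
def Claim_unchanged_retain_only_child_tags_py : Prop :=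
  ∀ (tag_names : List String), Dom_retain_only_child_tags_py tag_names →
    Spec_retain_only_child_tags_py tag_names (retain_only_child_tags_py tag_names)
def Claim_changed_retain_only_child_tags_py : Prop :=
  Dom_retain_only_child_tags_py (pvDiffWitness_retain_only_child_tags_py) ∧
  D_retain_only_child_tags_py (pvDiffWitness_retain_only_child_tags_py) ∧
  retain_only_child_tags_py (pvDiffWitness_retain_only_child_tags_py) = pvDiffWitnessOut_retain_only_child_tags_py.1 ∧
  retain_only_child_tags_py_alt (pvDiffWitness_retain_only_child_tags_py) = pvDiffWitnessOut_retain_only_child_tags_py.2 ∧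
  pvDiffWitnessOut_retain_only_child_tags_py.1 ≠ pvDiffWitnessOut_retain_only_child_tags_py.2
def Claim_exact_retain_only_child_tags_py : Prop :=
  ∀ (tag_names : List String), Dom_retain_only_child_tags_py tag_names →
    D_retain_only_child_tags_py tag_names →
    retain_only_child_tags_py tag_names ≠ retain_only_child_tags_py_alt tag_names

-- ===== LEMMAS AND PROOFS =====

-- pvSplit2: a structural description of Python's s.split("::") (proved equal to the
-- ports' PySem.Chars.splitOn below), and the node-boundary relations the proof uses.
def pvSplit2 : List Char → List (List Char)
  | [] => [[]]
  | [c] => [[c]]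
  | c :: d :: r =>
    if c = ':' ∧ d = ':' then [] :: pvSplit2 r
    else match pvSplit2 (d :: r) with
         | [] => [[c]]
         | h :: t => (c :: h) :: t

def pvStripEmpty (l : List (List Char)) : List (List Char) := l.dropWhile (fun y => y.isEmpty)

-- "s is a true node-boundary proper descendant of t"
def pvBrel (t s : String) : Bool :=
  (pvSplit2 t.toList).isPrefixOf (pvSplit2 s.toList) &&
    decide ((pvSplit2 t.toList).length < (pvSplit2 s.toList).length)

-- "A's empty-skipping prefix accumulator reaches t from s"
def pvArel (t s : String) : Bool :=
  if (pvSplit2 t.toList).headI = ([] : List Char) then (t == "") && pvBrel t s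
  else (pvSplit2 t.toList).isPrefixOf (pvStripEmpty (pvSplit2 s.toList)) &&
       decide ((pvSplit2 t.toList).length < (pvStripEmpty (pvSplit2 s.toList)).length)

theorem pvSplit2_ne_nil (l : List Char) : pvSplit2 l ≠ [] := by
  match l with
  | [] => simp [pvSplit2]
  | [c] => simp [pvSplit2]
  | c :: d :: r =>
    simp only [pvSplit2]
    split
    · simp
    · split <;> simp

theorem pvGo (fuel : Nat) (l cur : List Char) (acc : List (List Char))
    (h : l.length < fuel) :
    PySem.Chars.splitOn.go [':', ':'] fuel l cur acc =
      acc.reverse ++ (match pvSplit2 l with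
                      | [] => []
                      | h :: t => (cur.reverse ++ h) :: t) := by
  induction fuel generalizing l cur acc with
  | zero => omega
  | succ fuel ih =>
    match l with
    | [] => simp [PySem.Chars.splitOn.go, pvSplit2]
    | [c] =>
      have hnp : ¬ ([':', ':'].isPrefixOf [c] = true) := by
        simp [List.isPrefixOf]
      rw [PySem.Chars.splitOn.go]
      simp only [hnp, Bool.false_eq_true, if_false]
      rw [ih [] (c :: cur) acc (by simp at h ⊢; omega)]
      simp [pvSplit2]
    | c :: d :: r =>
      by_cases hp : c = ':' ∧ d = ':'
      · obtain ⟨rfl, rfl⟩ := hp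
        rw [PySem.Chars.splitOn.go]
        have : [':', ':'].isPrefixOf (':' :: ':' :: r) = true := by simp [List.isPrefixOf]
        simp only [this, if_true]
        have hd : List.drop [':', ':'].length (':' :: ':' :: r) = r := rfl
        rw [hd, ih r [] (cur.reverse :: acc) (by simp at h ⊢; omega)]
        have h2 := pvSplit2_ne_nil r
        simp only [pvSplit2]
        cases hr : pvSplit2 r with
        | nil => exact absurd hr h2
        | cons a t => simp
      · rw [PySem.Chars.splitOn.go]
        have hnp : ([':', ':'].isPrefixOf (c :: d :: r)) = false := by
          simp [List.isPrefixOf]; intro h1 h2; exact hp ⟨h1.symm, h2.symm⟩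
        simp only [hnp, Bool.false_eq_true, if_false]
        rw [ih (d :: r) (c :: cur) acc (by simp at h ⊢; omega)]
        have h2 := pvSplit2_ne_nil (d :: r)
        simp only [pvSplit2, if_neg hp]
        cases hr : pvSplit2 (d :: r) with
        | nil => exact absurd hr h2
        | cons a t => simp

theorem pvSplitOn_eq (l : List Char) :
    PySem.Chars.splitOn l [':', ':'] = pvSplit2 l := by
  have := pvGo (l.length + 1) l [] [] (by omega)
  rw [PySem.Chars.splitOn] at *
  rw [this]
  have h2 := pvSplit2_ne_nil l
  cases hr : pvSplit2 l with
  | nil => exact absurd hr h2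
  | cons a t => simp

def pvJ : List (List Char) → List Char
  | [] => []
  | h :: t => h ++ t.flatMap (fun n => ':' :: ':' :: n)

theorem pvJ_cons (x : List Char) (t : List (List Char)) (ht : t ≠ []) :
    pvJ (x :: t) = x ++ ':' :: ':' :: pvJ t := by
  cases t with
  | nil => exact absurd rfl ht
  | cons y t2 => simp [pvJ]

theorem pvJ_join_split (l : List Char) : pvJ (pvSplit2 l) = l := by
  match l with
  | [] => simp [pvSplit2, pvJ]
  | [c] => simp [pvSplit2, pvJ]
  | c :: d :: r =>
    simp only [pvSplit2]
    by_cases hp : c = ':' ∧ d = ':'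
    · obtain ⟨rfl, rfl⟩ := hp
      rw [if_pos ⟨rfl, rfl⟩, pvJ_cons _ _ (pvSplit2_ne_nil r), pvJ_join_split r]
      simp
    · rw [if_neg hp]
      have h2 := pvSplit2_ne_nil (d :: r)
      have hj := pvJ_join_split (d :: r)
      cases hr : pvSplit2 (d :: r) with
      | nil => exact absurd hr h2
      | cons a t =>
        rw [hr] at hj
        simp only [pvJ] at hj ⊢
        simp [hj]

def pvClean : List Char → Bool
  | [] => true
  | [c] => decide (c ≠ ':')
  | c :: d :: r => !(decide (c = ':') && decide (d = ':')) && pvClean (d :: r)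

theorem pvSplit2_single (y : List Char) (h : pvClean y = true) : pvSplit2 y = [y] := by
  match y with
  | [] => simp [pvSplit2]
  | [c] => simp [pvSplit2]
  | c :: d :: r =>
    simp only [pvClean, Bool.and_eq_true, Bool.not_eq_true', Bool.and_eq_false_iff,
      decide_eq_false_iff_not] at h
    have hnp : ¬ (c = ':' ∧ d = ':') := by
      rcases h.1 with h1 | h1 <;> simp_all
    rw [pvSplit2, if_neg hnp, pvSplit2_single (d :: r) h.2]

theorem pvSplit2_cons2 (c d : Char) (r : List Char) :
    pvSplit2 (c :: d :: r) = if c = ':' ∧ d = ':' then [] :: pvSplit2 r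
      else match pvSplit2 (d :: r) with
           | [] => [[c]]
           | h :: t => (c :: h) :: t := rfl

theorem pvSplit2_clean_append (y z : List Char) (h : pvClean y = true) :
    pvSplit2 (y ++ ':' :: ':' :: z) = y :: pvSplit2 z := by
  match y with
  | [] =>
    rw [List.nil_append, pvSplit2_cons2, if_pos ⟨rfl, rfl⟩]
  | [c] =>
    have hc : ¬ (c = ':' ∧ ':' = ':') := by simp [pvClean] at h; exact fun hh => h hh.1
    rw [List.cons_append, List.nil_append, pvSplit2_cons2, if_neg hc,
      pvSplit2_cons2, if_pos ⟨rfl, rfl⟩]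
  | c :: d :: r =>
    simp only [pvClean, Bool.and_eq_true, Bool.not_eq_true', Bool.and_eq_false_iff,
      decide_eq_false_iff_not] at h
    have hnp : ¬ (c = ':' ∧ d = ':') := by
      rcases h.1 with h1 | h1 <;> simp_all
    rw [List.cons_append, List.cons_append, pvSplit2_cons2, if_neg hnp]
    have ih := pvSplit2_clean_append (d :: r) z h.2
    rw [List.cons_append] at ih
    rw [ih]

theorem pvSplit2_pvJ (ys : List (List Char)) (hne : ys ≠ [])
    (hcl : ∀ y ∈ ys, pvClean y = true) : pvSplit2 (pvJ ys) = ys := by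
  match ys with
  | [] => exact absurd rfl hne
  | [y] => simpa [pvJ] using pvSplit2_single y (hcl y (by simp))
  | y :: y2 :: t =>
    rw [pvJ_cons y (y2 :: t) (by simp), pvSplit2_clean_append y (pvJ (y2 :: t)) (hcl y (by simp)),
      pvSplit2_pvJ (y2 :: t) (by simp) (fun a ha => hcl a (List.mem_cons_of_mem _ ha))]

theorem pvSplit2_dropLast_clean (l : List Char) :
    ∀ y ∈ (pvSplit2 l).dropLast, pvClean y = true := by
  match l with
  | [] => simp [pvSplit2]
  | [c] => simp [pvSplit2]
  | c :: d :: r =>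
    by_cases hp : c = ':' ∧ d = ':'
    · obtain ⟨rfl, rfl⟩ := hp
      rw [pvSplit2_cons2, if_pos ⟨rfl, rfl⟩]
      rw [List.dropLast_cons_of_ne_nil (pvSplit2_ne_nil r)]
      intro y hy
      rcases List.mem_cons.mp hy with rfl | hy
      · rfl
      · exact pvSplit2_dropLast_clean r y hy
    · rw [pvSplit2_cons2, if_neg hp]
      have h2 := pvSplit2_ne_nil (d :: r)
      have hj := pvJ_join_split (d :: r)
      have ihm := pvSplit2_dropLast_clean (d :: r)
      cases hr : pvSplit2 (d :: r) with
      | nil => exact absurd hr h2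
      | cons a t =>
        rw [hr] at hj ihm
        cases t with
        | nil => simp
        | cons b t2 =>
          rw [List.dropLast_cons_of_ne_nil (by simp)]
          rw [List.dropLast_cons_of_ne_nil (by simp)] at ihm
          intro y hy
          rcases List.mem_cons.mp hy with rfl | hy
          · -- y = c :: a ; a is clean (it is non-final in pvSplit2 (d :: r))
            have ha : pvClean a = true := ihm a (by simp)
            -- pvJ ((a :: b :: t2)) = d :: r  gives the head link between a and d
            rw [pvJ_cons a (b :: t2) (by simp)] at hj
            cases a with
            | nil =>
              -- then d = ':' and c ≠ ':'
              simp only [List.nil_append] at hj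
              have hd : d = ':' := by
                have := congrArg (fun z => z.head?) hj
                simpa using this.symm
              have hc : ¬ c = ':' := fun hc => hp ⟨hc, hd⟩
              simp [pvClean, hc]
            | cons e a' =>
              have he : d = e := by
                have := congrArg (fun z => z.head?) hj
                simpa using this.symm
              subst he
              simp only [pvClean, Bool.and_eq_true, Bool.not_eq_true']
              constructor
              · simp only [Bool.and_eq_false_iff, decide_eq_false_iff_not]
                tauto
              · exact ha
          · exact ihm y (List.mem_cons_of_mem _ hy)

theorem pvStrip_nil_cons (l : List (List Char)) :
    pvStripEmpty (([] : List Char) :: l) = pvStripEmpty l := by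
  simp [pvStripEmpty]

theorem pvStrip_cons (x : List Char) (l : List (List Char)) (hx : x ≠ []) :
    pvStripEmpty (x :: l) = x :: l := by
  simp [pvStripEmpty, List.isEmpty_iff, hx]

theorem pvStrip_length_le (l : List (List Char)) : (pvStripEmpty l).length ≤ l.length :=
  List.length_dropWhile_le _ _

theorem pvSplit2_length_pos (tl : List Char) : 1 ≤ (pvSplit2 tl).length :=
  List.length_pos_iff.mpr (pvSplit2_ne_nil tl)

def pvARHS (tl : List Char) (ns : List (List Char)) : Prop :=
  if (pvSplit2 tl).headI = ([] : List Char)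
  then tl = [] ∧ pvSplit2 tl <+: ns ∧ (pvSplit2 tl).length < ns.length
  else pvSplit2 tl <+: pvStripEmpty ns ∧ (pvSplit2 tl).length < (pvStripEmpty ns).length

theorem pvCrux (tl : List Char) (ns : List (List Char))
    (hcl : ∀ y ∈ ns.dropLast, pvClean y = true) :
    (∃ k, 1 ≤ k ∧ k ≤ ns.length - 1 ∧ tl = pvJ (pvStripEmpty (ns.take k)))
      ↔ pvARHS tl ns := by
  match ns with
  | [] =>
    have h1 := pvSplit2_length_pos tl
    constructor
    · rintro ⟨k, hk1, hk2, -⟩; simp at hk2; omega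
    · intro h
      unfold pvARHS at h
      split at h
      · exact absurd h.2.2 (by simp)
      · exact absurd h.2 (by simp [pvStripEmpty])
  | [x] =>
    have h1 := pvSplit2_length_pos tl
    have h2 : (pvStripEmpty [x]).length ≤ 1 := by simpa using pvStrip_length_le [x]
    constructor
    · rintro ⟨k, hk1, hk2, -⟩; simp at hk2; omega
    · intro h
      unfold pvARHS at h
      split at h
      · have h3 : ([x] : List (List Char)).length = 1 := rfl
        exact absurd h.2.2 (by omega)
      · exact absurd h.2 (by omega)
  | x :: y :: l =>
    have hlne : (y :: l : List (List Char)) ≠ [] := by simp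
    by_cases hx : (x : List Char) = []
    · subst hx
      have hclₜ : ∀ z ∈ (y :: l).dropLast, pvClean z = true := by
        intro z hz
        exact hcl z (by
          rw [List.dropLast_cons_of_ne_nil hlne]
          exact List.mem_cons_of_mem _ hz)
      have ih := pvCrux tl (y :: l) hclₜ
      have hL : (∃ k, 1 ≤ k ∧ k ≤ ([] :: y :: l : List (List Char)).length - 1 ∧
            tl = pvJ (pvStripEmpty (([] :: y :: l).take k)))
          ↔ (tl = [] ∨ ∃ k, 1 ≤ k ∧ k ≤ (y :: l : List (List Char)).length - 1 ∧
            tl = pvJ (pvStripEmpty ((y :: l).take k))) := by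
        constructor
        · rintro ⟨k, hk1, hk2, hval⟩
          obtain _ | _ | j := k
          · omega
          · left
            simpa [pvStripEmpty, pvJ] using hval
          · right
            refine ⟨j + 1, by omega, by simp at hk2 ⊢; omega, ?_⟩
            rw [List.take_succ_cons, pvStrip_nil_cons] at hval
            exact hval
        · rintro (rfl | ⟨k, hk1, hk2, hval⟩)
          · exact ⟨1, le_refl 1, by simp, by simp [pvStripEmpty, pvJ]⟩
          · refine ⟨k + 1, by omega, by simp at hk2 ⊢; omega, ?_⟩
            rw [List.take_succ_cons, pvStrip_nil_cons]
            exact hval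
      have hR : pvARHS tl ([] :: y :: l) ↔ (tl = [] ∨ pvARHS tl (y :: l)) := by
        by_cases htl : tl = []
        · subst htl
          simp only [true_or, iff_true]
          unfold pvARHS
          rw [if_pos (by simp [pvSplit2])]
          refine ⟨rfl, ?_, ?_⟩
          · show pvSplit2 [] <+: _
            simp only [pvSplit2]
            exact ⟨y :: l, rfl⟩
          · simp [pvSplit2]
        · unfold pvARHS
          by_cases hh : (pvSplit2 tl).headI = ([] : List Char)
          · rw [if_pos hh, if_pos hh]
            simp [htl]
          · rw [if_neg hh, if_neg hh, pvStrip_nil_cons]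
            simp [htl]
      rw [hL, hR, ih]
    · -- head node nonempty: strip is the identity here and no k gives the empty tag
      have hstrip : pvStripEmpty (x :: y :: l) = x :: y :: l := pvStrip_cons _ _ hx
      have hxc : pvClean x = true := by
        apply hcl
        rw [List.dropLast_cons_of_ne_nil hlne]
        exact List.mem_cons_self
      have hclaim : (∃ k, 1 ≤ k ∧ k ≤ (x :: y :: l : List (List Char)).length - 1 ∧
            tl = pvJ (pvStripEmpty ((x :: y :: l).take k)))
          ↔ (pvSplit2 tl <+: x :: y :: l ∧
             (pvSplit2 tl).length < (x :: y :: l : List (List Char)).length ∧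
             (pvSplit2 tl).headI ≠ ([] : List Char)) := by
        constructor
        · rintro ⟨k, hk1, hk2, hval⟩
          -- k = j + 1, take k (x :: y :: l) = x :: take j (y :: l)
          obtain ⟨j, rfl⟩ : ∃ j, k = j + 1 := ⟨k - 1, by omega⟩
          rw [List.take_succ_cons, pvStrip_cons _ _ hx] at hval
          have hj : j ≤ (y :: l : List (List Char)).length - 1 := by simp at hk2 ⊢; omega
          have hcl2 : ∀ a ∈ (y :: l).take j, pvClean a = true := by
            intro a ha
            apply hcl
            rw [List.dropLast_cons_of_ne_nil hlne]
            apply List.mem_cons_of_mem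
            have : (y :: l).take j = ((y :: l).dropLast).take j := by
              rw [List.dropLast_eq_take, List.take_take]
              congr 1
              simp at hj ⊢
              omega
            rw [this] at ha
            exact List.take_subset _ _ ha
          have hsp : pvSplit2 tl = x :: (y :: l).take j := by
            rw [hval]
            apply pvSplit2_pvJ _ (by simp)
            intro a ha
            rcases List.mem_cons.mp ha with rfl | ha
            · exact hxc
            · exact hcl2 a ha
          refine ⟨?_, ?_, ?_⟩
          · rw [hsp]
            exact List.cons_prefix_cons.mpr ⟨rfl, List.take_prefix _ _⟩
          · rw [hsp]
            simp at hj ⊢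
            omega
          · rw [hsp]
            simpa using hx
        · rintro ⟨hp, hlen, hh⟩
          have hne := pvSplit2_ne_nil tl
          cases hsp : pvSplit2 tl with
          | nil => exact absurd hsp hne
          | cons a u =>
            rw [hsp] at hp hlen hh
            obtain ⟨rfl, hu⟩ := List.cons_prefix_cons.mp hp
            have hulen : u.length < (y :: l : List (List Char)).length := by
              simpa using hlen
            have hutake : u = (y :: l).take u.length := List.prefix_iff_eq_take.mp hu
            refine ⟨u.length + 1, by omega, by simp at hulen ⊢; omega, ?_⟩
            rw [List.take_succ_cons, pvStrip_cons _ _ hx, ← hutake]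
            calc tl = pvJ (pvSplit2 tl) := (pvJ_join_split tl).symm
              _ = pvJ (a :: u) := by rw [hsp]
      rw [hclaim]
      unfold pvARHS
      by_cases hh : (pvSplit2 tl).headI = ([] : List Char)
      · rw [if_pos hh]
        constructor
        · rintro ⟨-, -, hne⟩; exact absurd hh hne
        · rintro ⟨rfl, hp, -⟩
          exfalso
          have : pvSplit2 ([] : List Char) = [[]] := by simp [pvSplit2]
          rw [this] at hp
          rcases hp with ⟨w, hw⟩
          have : x = [] := by
            have := congrArg (fun z => z.headI) hw
            simpa using this.symm
          exact hx this
      · rw [if_neg hh, hstrip]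
        constructor
        · rintro ⟨h1, h2, -⟩; exact ⟨h1, h2⟩
        · rintro ⟨h1, h2⟩; exact ⟨h1, h2, hh⟩

-- ===== A-side fold characterization =====

def pvExt (cur n : List Char) : List Char :=
  (if cur = [] then cur else cur ++ [':', ':']) ++ n

def pvF (tags : List String) (st : List Char × List String) (node : List Char) :
    List Char × List String :=
  let partial_tag := if st.1 = ([] : List Char) then st.1 else st.1 ++ [':', ':']
  let partial_tag := partial_tag ++ node
  if String.ofList partial_tag ∈ tags then
    (partial_tag, st.2 ++ [String.ofList partial_tag])
  else (partial_tag, st.2)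

theorem pvF_fst (tags : List String) (st : List Char × List String) (node : List Char) :
    (pvF tags st node).1 = pvExt st.1 node := by
  simp only [pvF, pvExt]
  split <;> split <;> rfl

theorem pvF_snd (tags : List String) (st : List Char × List String) (node : List Char) :
    (pvF tags st node).2 =
      if String.ofList (pvExt st.1 node) ∈ tags
      then st.2 ++ [String.ofList (pvExt st.1 node)] else st.2 := by
  simp only [pvF, pvExt]
  split <;> split <;> rfl

theorem pvInner_mem (tags : List String) (zs : List (List Char)) (cur : List Char)
    (ps : List String) (x : String) :
    x ∈ (zs.foldl (pvF tags) (cur, ps)).2 ↔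
      x ∈ ps ∨ ∃ k, 1 ≤ k ∧ k ≤ zs.length ∧
        x = String.ofList (List.foldl pvExt cur (zs.take k)) ∧ x ∈ tags := by
  induction zs generalizing cur ps with
  | nil => simp
  | cons n zs ih =>
    rw [List.foldl_cons]
    have hstep : pvF tags (cur, ps) n =
        (pvExt cur n,
          if String.ofList (pvExt cur n) ∈ tags
          then ps ++ [String.ofList (pvExt cur n)] else ps) := by
      rw [Prod.ext_iff]
      exact ⟨pvF_fst tags (cur, ps) n, pvF_snd tags (cur, ps) n⟩
    rw [hstep, ih]
    constructor
    · rintro (hx | ⟨k, hk1, hk2, hval, hxt⟩)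
      · split at hx
        · rcases List.mem_append.mp hx with hx | hx
          · exact Or.inl hx
          · simp only [List.mem_singleton] at hx
            subst hx
            exact Or.inr ⟨1, le_refl 1, by simp, by simp, by assumption⟩
        · exact Or.inl hx
      · exact Or.inr ⟨k + 1, by omega, by simp; omega, by simpa using hval, hxt⟩
    · rintro (hx | ⟨k, hk1, hk2, hval, hxt⟩)
      · left; split
        · exact List.mem_append.mpr (Or.inl hx)
        · exact hx
      · obtain _ | j := k
        · omega
        · obtain _ | j := j
          · -- k = 1 : the element produced by this step
            left
            simp only [List.take_succ_cons, List.take_zero, List.foldl_cons,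
              List.foldl_nil] at hval
            rw [if_pos (hval ▸ hxt)]
            subst hval
            simp
          · -- k = j + 2 : comes from the tail
            right
            refine ⟨j + 1, by omega, by simp at hk2; omega, ?_, hxt⟩
            simpa using hval

theorem pvOuter_mem (tags tags' : List String) (ps0 : List String) (x : String) :
    x ∈ tags'.foldl (fun parent_tag_names tag_name =>
        ((PySem.List.slice (PySem.Chars.splitOn tag_name.toList [':', ':']) none (some (-1))).foldl
          (pvF tags) (([] : List Char), parent_tag_names)).2) ps0 ↔
      x ∈ ps0 ∨ ∃ s ∈ tags', (∃ k, 1 ≤ k ∧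
        k ≤ (PySem.List.slice (PySem.Chars.splitOn s.toList [':', ':']) none (some (-1))).length ∧
        x = String.ofList (List.foldl pvExt []
          ((PySem.List.slice (PySem.Chars.splitOn s.toList [':', ':']) none (some (-1))).take k)) ∧
        x ∈ tags) := by
  induction tags' generalizing ps0 with
  | nil => simp
  | cons s tags' ih =>
    rw [List.foldl_cons, ih, pvInner_mem]
    constructor
    · rintro (( hx | hex) | hex)
      · exact Or.inl hx
      · exact Or.inr ⟨s, by simp, hex⟩
      · obtain ⟨s', hs', hex⟩ := hex
        exact Or.inr ⟨s', by simp [hs'], hex⟩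
    · rintro (hx | ⟨s', hs', hex⟩)
      · exact Or.inl (Or.inl hx)
      · rcases List.mem_cons.mp hs' with rfl | hs'
        · exact Or.inl (Or.inr hex)
        · exact Or.inr ⟨s', hs', hex⟩

-- foldl pvExt from the empty accumulator is "join the non-skipped nodes"

theorem pvExt_foldl_ne_nil (cur : List Char) (zs : List (List Char)) (h : cur ≠ []) :
    List.foldl pvExt cur zs = cur ++ zs.flatMap (fun n => ':' :: ':' :: n) := by
  induction zs generalizing cur with
  | nil => simp
  | cons n zs ih =>
    rw [List.foldl_cons]
    have h1 : pvExt cur n = cur ++ ':' :: ':' :: n := by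
      unfold pvExt
      rw [if_neg h]
      simp
    rw [h1, ih _ (by simp)]
    simp

theorem pvExt_foldl_nil (zs : List (List Char)) :
    List.foldl pvExt [] zs = pvJ (pvStripEmpty zs) := by
  induction zs with
  | nil => simp [pvStripEmpty, pvJ]
  | cons n zs ih =>
    by_cases hn : (n : List Char) = []
    · subst hn
      rw [List.foldl_cons]
      have : pvExt [] [] = [] := rfl
      rw [this, ih, pvStrip_nil_cons]
    · rw [List.foldl_cons]
      have h1 : pvExt [] n = n := by simp [pvExt]
      rw [h1, pvExt_foldl_ne_nil n zs hn, pvStrip_cons _ _ hn]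
      simp [pvJ]

def pvParents (tags : List String) : List String :=
  tags.foldl (fun parent_tag_names tag_name =>
    ((PySem.List.slice (PySem.Chars.splitOn tag_name.toList [':', ':']) none (some (-1))).foldl
      (pvF tags) (([] : List Char), parent_tag_names)).2) []

def pvLA (tags : List String) : List String :=
  PySem.Set.diff (PySem.Set.ofList tags) (PySem.Set.ofList (pvParents tags))

theorem pvA_eq (tags : List String) :
    retain_only_child_tags_py tags = PySem.List.sorted (pvLA tags) (fun x => x) false := rfl

def pvQ (tags : List String) (t : String) : Bool :=
  !((PySem.List.dedup tags).map (fun u => PySem.Chars.splitOn u.toList [':', ':'])).any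
      (fun ns => decide ((PySem.Chars.splitOn t.toList [':', ':']).length < ns.length) &&
        (PySem.List.slice ns none (some ((PySem.Chars.splitOn t.toList [':', ':']).length : Int)) ==
          PySem.Chars.splitOn t.toList [':', ':']))

def pvLB (tags : List String) : List String :=
  (PySem.List.dedup tags).filter (pvQ tags)

theorem pvZipSelfMap {β : Type} (l : List String) (g : String → β) :
    l.zip (l.map g) = l.map (fun a => (a, g a)) := by
  induction l with
  | nil => rfl
  | cons a l ih => simp [ih]

theorem pvB_eq (tags : List String) :
    retain_only_child_tags_py_alt tags = PySem.List.sorted (pvLB tags) (fun x => x) false := by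
  simp only [retain_only_child_tags_py_alt]
  rw [pvZipSelfMap, List.filter_map, List.map_map]
  have h2 : (Prod.fst ∘ fun a : String => (a, pvSplitTag a)) =
      fun a : String => a := rfl
  rw [h2, List.map_id']
  rfl

-- ===== membership characterizations =====

theorem pvArel_iff (x s : String) :
    pvArel x s = true ↔ pvARHS x.toList (pvSplit2 s.toList) := by
  unfold pvArel pvARHS
  by_cases hh : (pvSplit2 x.toList).headI = ([] : List Char)
  · rw [if_pos hh, if_pos hh]
    unfold pvBrel
    simp only [Bool.and_eq_true, beq_iff_eq, decide_eq_true_eq,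
      List.isPrefixOf_iff_prefix, ← String.toList_eq_nil_iff]
  · rw [if_neg hh, if_neg hh]
    simp [List.isPrefixOf_iff_prefix]

theorem pvMemParents (tags : List String) (x : String) :
    x ∈ pvParents tags ↔ x ∈ tags ∧ ∃ s ∈ tags, pvARHS x.toList (pvSplit2 s.toList) := by
  unfold pvParents
  rw [pvOuter_mem]
  simp only [List.not_mem_nil, false_or]
  constructor
  · rintro ⟨s, hs, k, hk1, hk2, hval, hxt⟩
    refine ⟨hxt, s, hs, ?_⟩
    rw [pvSplitOn_eq, PySem.List.slice_to_neg_one] at hk2 hval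
    have hlen : (pvSplit2 s.toList).dropLast.length = (pvSplit2 s.toList).length - 1 := by
      simp
    have htake : (pvSplit2 s.toList).dropLast.take k = (pvSplit2 s.toList).take k := by
      rw [List.dropLast_eq_take, List.take_take]
      congr 1
      omega
    rw [pvExt_foldl_nil, htake] at hval
    have hxl : x.toList = pvJ (pvStripEmpty ((pvSplit2 s.toList).take k)) := by
      rw [hval, String.toList_ofList]
    exact (pvCrux x.toList (pvSplit2 s.toList) (pvSplit2_dropLast_clean s.toList)).mp
      ⟨k, hk1, by omega, hxl⟩
  · rintro ⟨hxt, s, hs, harh⟩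
    obtain ⟨k, hk1, hk2, hval⟩ :=
      (pvCrux x.toList (pvSplit2 s.toList) (pvSplit2_dropLast_clean s.toList)).mpr harh
    refine ⟨s, hs, k, hk1, ?_, ?_, hxt⟩
    · rw [pvSplitOn_eq, PySem.List.slice_to_neg_one]
      simp
      omega
    · rw [pvSplitOn_eq, PySem.List.slice_to_neg_one, pvExt_foldl_nil]
      have htake : (pvSplit2 s.toList).dropLast.take k = (pvSplit2 s.toList).take k := by
        rw [List.dropLast_eq_take, List.take_take]
        congr 1
        omega
      rw [htake, ← hval, String.ofList_toList]

theorem memA (tags : List String) (x : String) :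
    x ∈ retain_only_child_tags_py tags ↔
      x ∈ tags ∧ ¬ (tags.any (fun s => pvArel x s) = true) := by
  rw [pvA_eq, PySem.List.mem_sorted]
  unfold pvLA
  rw [PySem.Set.mem_diff, PySem.Set.mem_ofList, PySem.Set.mem_ofList, pvMemParents]
  simp only [List.any_eq_true]
  constructor
  · rintro ⟨hx, hnp⟩
    refine ⟨hx, ?_⟩
    rintro ⟨s, hs, ha⟩
    exact hnp ⟨hx, s, hs, (pvArel_iff x s).mp ha⟩
  · rintro ⟨hx, hne⟩
    refine ⟨hx, ?_⟩
    rintro ⟨-, s, hs, ha⟩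
    exact hne ⟨s, hs, (pvArel_iff x s).mpr ha⟩

theorem memB (tags : List String) (x : String) :
    x ∈ retain_only_child_tags_py_alt tags ↔
      x ∈ tags ∧ ¬ (tags.any (fun s => pvBrel x s) = true) := by
  rw [pvB_eq, PySem.List.mem_sorted]
  unfold pvLB
  rw [List.mem_filter, PySem.List.mem_dedup]
  apply and_congr_right
  intro hx
  unfold pvQ
  rw [Bool.not_eq_true', ← Bool.not_eq_true]
  apply not_congr
  rw [List.any_map, List.any_eq_true, List.any_eq_true]
  constructor
  · rintro ⟨s, hs, hcond⟩
    refine ⟨s, (PySem.List.mem_dedup tags s).mp hs, ?_⟩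
    simp only [Function.comp] at hcond
    unfold pvBrel
    simp only [Bool.and_eq_true, decide_eq_true_eq, beq_iff_eq] at hcond ⊢
    rw [PySem.List.slice_to_natCast, pvSplitOn_eq, pvSplitOn_eq] at hcond
    refine ⟨?_, hcond.1⟩
    rw [List.isPrefixOf_iff_prefix, List.prefix_iff_eq_take]
    exact hcond.2.symm
  · rintro ⟨s, hs, hcond⟩
    refine ⟨s, (PySem.List.mem_dedup tags s).mpr hs, ?_⟩
    simp only [Function.comp]
    unfold pvBrel at hcond
    simp only [Bool.and_eq_true, decide_eq_true_eq, beq_iff_eq] at hcond ⊢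
    rw [PySem.List.slice_to_natCast, pvSplitOn_eq, pvSplitOn_eq]
    refine ⟨hcond.2, ?_⟩
    have := (List.prefix_iff_eq_take).mp ((List.isPrefixOf_iff_prefix).mp hcond.1)
    exact this.symm

theorem pvNodupLA (tags : List String) : (pvLA tags).Nodup :=
  PySem.Set.nodup_diff _ _ (PySem.Set.nodup_ofList tags)

theorem pvNodupLB (tags : List String) : (pvLB tags).Nodup :=
  List.Nodup.filter _ (PySem.List.nodup_dedup tags)

theorem pvMemLA (tags : List String) (x : String) :
    x ∈ pvLA tags ↔ x ∈ tags ∧ ¬ (tags.any (fun s => pvArel x s) = true) := by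
  have h := memA tags x
  rwa [pvA_eq, PySem.List.mem_sorted] at h

theorem pvMemLB (tags : List String) (x : String) :
    x ∈ pvLB tags ↔ x ∈ tags ∧ ¬ (tags.any (fun s => pvBrel x s) = true) := by
  have h := memB tags x
  rwa [pvB_eq, PySem.List.mem_sorted] at h

-- ===== bridging the compact D_ relation to the node-list relations =====

theorem pvSplitTag_eq (t : String) : pvSplitTag t = pvSplit2 t.toList :=
  pvSplitOn_eq t.toList

theorem pvStrip_head (l : List (List Char)) (h : List Char) (t : List (List Char))
    (hst : pvStripEmpty l = h :: t) : h ≠ [] := by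
  induction l with
  | nil => simp [pvStripEmpty] at hst
  | cons y l ih =>
    by_cases hy : (y : List Char) = []
    · subst hy
      rw [pvStrip_nil_cons] at hst
      exact ih hst
    · rw [pvStrip_cons _ _ hy] at hst
      have hyh := (List.cons.inj hst).1
      exact hyh ▸ hy

-- "prefix of the dropLast" versus "proper prefix"
theorem pvProper_take (nt ns : List (List Char)) (hnt : nt ≠ []) :
    nt <+: ns.dropLast ↔ (nt <+: ns ∧ nt.length < ns.length) := by
  rw [List.dropLast_eq_take, List.prefix_take_iff]
  refine and_congr_right (fun _ => ?_)
  have h1 : 1 ≤ nt.length := List.length_pos_iff.mpr hnt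
  omega

theorem pvBrel_bridge (t s : String) : pvAnc false t s = pvBrel t s := by
  rw [Bool.eq_iff_iff]
  unfold pvAnc pvBrel
  simp only [pvSplitTag_eq, Bool.and_eq_true, List.isPrefixOf_iff_prefix, Bool.false_eq_true,
    if_false, decide_eq_true_eq]
  exact pvProper_take _ _ (pvSplit2_ne_nil t.toList)

theorem pvArel_bridge (t s : String) (ht : t ≠ "") : pvAnc true t s = pvArel t s := by
  rw [Bool.eq_iff_iff]
  unfold pvAnc pvArel
  have hstrip : List.dropWhile List.isEmpty (pvSplit2 s.toList) =
      pvStripEmpty (pvSplit2 s.toList) := rfl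
  simp only [if_true, pvSplitTag_eq, hstrip, List.isPrefixOf_iff_prefix]
  rw [pvProper_take _ _ (pvSplit2_ne_nil t.toList)]
  by_cases hh : (pvSplit2 t.toList).headI = ([] : List Char)
  · rw [if_pos hh]
    constructor
    · rintro ⟨hp, hlen⟩
      exfalso
      have hne := pvSplit2_ne_nil t.toList
      cases hnt : pvSplit2 t.toList with
      | nil => exact hne hnt
      | cons a nt' =>
        rw [hnt] at hh hp hlen
        simp at hh
        subst hh
        cases hst : pvStripEmpty (pvSplit2 s.toList) with
        | nil =>
          rw [hst] at hlen
          simp at hlen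
        | cons h tail =>
          rw [hst] at hp
          obtain ⟨h1, -⟩ := List.cons_prefix_cons.mp hp
          exact pvStrip_head _ _ _ hst h1.symm
    · intro h
      simp only [Bool.and_eq_true, beq_iff_eq] at h
      exact absurd h.1 ht
  · rw [if_neg hh]
    simp only [Bool.and_eq_true, List.isPrefixOf_iff_prefix, decide_eq_true_eq]

theorem pvArel_empty (s : String) : pvArel "" s = pvBrel "" s := by
  unfold pvArel
  rw [if_pos (by rfl)]
  simp

theorem pvAny_A_eq (tags : List String) (a : String) (ha : a ≠ "") :
    (tags.any (fun s => pvArel a s)) = tags.any (pvAnc true a) :=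
  PySem.List.any_congr_mem (fun s _ => (pvArel_bridge a s ha).symm)

theorem pvAny_B_eq (tags : List String) (a : String) :
    (tags.any (fun s => pvBrel a s)) = tags.any (pvAnc false a) :=
  PySem.List.any_congr_mem (fun s _ => (pvBrel_bridge a s).symm)

theorem pvAny_eq_of_notD (tags : List String)
    (hD : ∀ t ∈ tags, t ≠ "" →
      (tags.any (pvAnc true t)) = tags.any (pvAnc false t))
    (a : String) (ha : a ∈ tags) :
    (tags.any (fun s => pvArel a s)) = tags.any (fun s => pvBrel a s) := by
  by_cases h0 : a = ""
  · subst h0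
    exact PySem.List.any_congr_mem (fun s _ => pvArel_empty s)
  · rw [pvAny_A_eq tags a h0, hD a ha h0, pvAny_B_eq tags a]

-- ===== VERDICT (by name: the statement is the Claim_ definition above) =====
theorem retain_only_child_tags_py_spec : Claim_unchanged_retain_only_child_tags_py := by
  intro tags _
  unfold Spec_retain_only_child_tags_py
  intro hD
  unfold D_retain_only_child_tags_py at hD
  simp only [not_exists, not_and, ne_eq, not_not] at hD
  rw [pvA_eq, pvB_eq]
  apply PySem.List.sorted_eq_sorted_of_perm _ _ _ (fun a b h => h)
  rw [List.perm_ext_iff_of_nodup (pvNodupLA tags) (pvNodupLB tags)]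
  intro a
  rw [pvMemLA, pvMemLB]
  constructor
  · rintro ⟨ha, hn⟩
    exact ⟨ha, fun hb => hn (by rw [pvAny_eq_of_notD tags hD a ha]; exact hb)⟩
  · rintro ⟨ha, hn⟩
    exact ⟨ha, fun hb => hn (by rw [← pvAny_eq_of_notD tags hD a ha]; exact hb)⟩

theorem retain_only_child_tags_py_changed : Claim_changed_retain_only_child_tags_py := by
  unfold Claim_changed_retain_only_child_tags_py
  refine ⟨by decide, by decide, by decide, ?_, by decide⟩
  rw [pvB_eq]
  have h : pvLB pvDiffWitness_retain_only_child_tags_py = ["b", "::b::c"] := by decide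
  rw [h]
  show PySem.List.sorted _ (fun x => x) false = _
  apply PySem.List.sorted_eq_of_perm_of_pairwise_lt
  · decide
  · simp
    decide

theorem retain_only_child_tags_py_tight : Claim_exact_retain_only_child_tags_py := by
  intro tags _ hD heq
  obtain ⟨t, ht, ht0, hneD⟩ := hD
  have hne : (tags.any (fun s => pvArel t s)) ≠ tags.any (fun s => pvBrel t s) := by
    rw [pvAny_A_eq tags t ht0, pvAny_B_eq tags t]
    exact hneD
  have h1 := memA tags t
  have h2 := memB tags t
  rw [heq] at h1
  have h3 := h1.symm.trans h2
  apply hne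
  by_cases hA : tags.any (fun s => pvArel t s) = true <;>
    by_cases hB : tags.any (fun s => pvBrel t s) = true
  · rw [hA, hB]
  · exact absurd hA (fun hA' => (h3.mpr ⟨ht, fun h => hB h⟩).2 hA')
  · exact absurd hB (fun hB' => (h3.mp ⟨ht, fun h => hA h⟩).2 hB')
  · rw [Bool.not_eq_true] at hA hB
    rw [hA, hB]
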